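-- pv_equiv track=rewrite | github.com/s1or-07/intruder-sample | intruder.py | parse_request
-- ===== SOURCE A (Python) =====
-- def parse_request(request_template):
--     lines = request_template.strip().split("\n")
--     method, url, _ = lines[0].split(" ", 2)
--     headers = {}
--     body = ""
--     is_body = False
--
--     for line in lines[1:]:
--         if not line.strip():  # Detecta la línea en blanco entre los headers y el body
--             is_body = True
--             continue
--
--         if is_body:
--             body += line + "\n"
--         else:
--             if ": " in line:
--                 key, value = line.split(": ", 1)
--                 headers[key] = value
--
--     return method, url, headers, body.strip()
-- ===== SOURCE B (Python) =====
-- def parse_request(request_template):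
--     lines = request_template.strip().split("\n")
--     method, url, _ = lines[0].split(" ", 2)
--     rest = lines[1:]
--     sep = next((i for i, l in enumerate(rest) if not l.strip()), len(rest))
--     headers = {l.split(": ", 1)[0]: l.split(": ", 1)[1]
--                for l in rest[:sep] if ": " in l}
--     body = "\n".join(l for l in rest[sep + 1:] if l.strip()).strip()
--     return method, url, headers, body
-- ===== Notes on version B (the rewrite author's own statement) =====
-- stated objective: simpler
-- what changed: B replaces A's single stateful loop with an is_body flag by first locating the blank separator line's index, then building headers via a dict comprehension over the slice before it and the body by joining the non-blank lines of the slice after it; Pre_ excludes inputs whose stripped first line contains fewer than two spaces, on which the three-way unpack of the first request line raises ValueError in A (and in B alike).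
import Mathlib
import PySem

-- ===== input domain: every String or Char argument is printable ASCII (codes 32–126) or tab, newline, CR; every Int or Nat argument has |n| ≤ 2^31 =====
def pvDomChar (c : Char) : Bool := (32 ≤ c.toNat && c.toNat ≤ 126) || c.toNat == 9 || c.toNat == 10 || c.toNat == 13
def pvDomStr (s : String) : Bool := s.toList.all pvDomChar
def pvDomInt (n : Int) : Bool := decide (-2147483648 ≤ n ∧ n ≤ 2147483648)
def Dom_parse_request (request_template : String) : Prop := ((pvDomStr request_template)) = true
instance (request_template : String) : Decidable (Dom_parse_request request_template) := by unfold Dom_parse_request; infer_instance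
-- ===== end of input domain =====

-- B replaces A's stateful is_body-flag loop by slicing at the first blank line; same cost, simpler decomposition.

-- ===== PORT A =====
-- loop body of A's for-loop; state = (headers, body as List Char, is_body)
def parseStepA (st : PySem.Dict String String × List Char × Bool) (line : String) :
    PySem.Dict String String × List Char × Bool :=
  if PySem.Str.strip line == "" then (st.1, st.2.1, true)
  else if st.2.2 then (st.1, st.2.1 ++ line.toList ++ ['\n'], st.2.2)
  else if PySem.Str.isIn ": " line then
    -- ": " in line guarantees split(": ", 1) yields exactly two parts; other arms unreachable
    match (PySem.Str.splitMax? line ": " 1).getD [] with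
    | [key, value] => (st.1.insert key value, st.2.1, st.2.2)
    | _ => (st.1, st.2.1, st.2.2)
  else (st.1, st.2.1, st.2.2)

def parse_request (request_template : String) : String × String × (List (String × String)) × String :=
  -- split? is some: the separator "\n" is nonempty
  let lines := (PySem.Str.split? (PySem.Str.strip request_template) "\n").getD []
  match (PySem.Str.splitMax? (lines.headD "") " " 2).getD [] with
  | [method, url, _rest] =>
    let fin := lines.tail.foldl parseStepA (PySem.Dict.empty, [], false)
    (method, url, fin.1.items, String.ofList (PySem.Chars.strip fin.2.1))
  | _ => ("", "", [], "")  -- Python raises ValueError here (3-way unpack); excluded by Pre_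

-- ===== PORT B =====
-- one header line of B's dict comprehension
def parseHeaderStep (d : PySem.Dict String String) (line : String) : PySem.Dict String String :=
  if PySem.Str.isIn ": " line then
    match (PySem.Str.splitMax? line ": " 1).getD [] with
    | [key, value] => d.insert key value
    | _ => d
  else d

def parse_request_alt (request_template : String) : String × String × (List (String × String)) × String :=
  let lines := (PySem.Str.split? (PySem.Str.strip request_template) "\n").getD []
  match (PySem.Str.splitMax? (lines.headD "") " " 2).getD [] with
  | [method, url, _rest] =>
    let rest := lines.tail
    let sep := (rest.findIdx? (fun l => PySem.Str.strip l == "")).getD rest.length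
    let headers := (rest.take sep).foldl parseHeaderStep PySem.Dict.empty
    let body := PySem.Str.strip (PySem.Str.join "\n"
      ((rest.drop (sep + 1)).filter (fun l => !(PySem.Str.strip l == ""))))
    (method, url, headers.items, body)
  | _ => ("", "", [], "")  -- same ValueError in B's Python; excluded by Pre_

-- ===== PRECONDITION & SPEC =====
-- Pre_ excludes exactly the inputs whose stripped first line has fewer than two spaces:
-- there the three-way unpack of the split first request line raises ValueError (in A and in B alike).
def Pre_parse_request (request_template : String) : Prop :=
  ((PySem.Str.splitMax?
      (((PySem.Str.split? (PySem.Str.strip request_template) "\n").getD []).headD "")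
      " " 2).getD []).length = 3
instance (request_template : String) : Decidable (Pre_parse_request request_template) := by
  unfold Pre_parse_request; infer_instance

def pvWitness_parse_request : String := "GET /index.html HTTP/1.1\nHost: example.com\n\nhello body"

def Spec_parse_request (request_template : String) (out : String × String × (List (String × String)) × String) : Prop := out = parse_request_alt request_template
instance (request_template : String) (out : String × String × (List (String × String)) × String) : Decidable (Spec_parse_request request_template out) := by unfold Spec_parse_request; infer_instance

-- ===== CLAIM (what is proved, stated in full; the proofs are below) =====
def Claim_equal_parse_request : Prop := ∀ (request_template : String), Dom_parse_request request_template → Pre_parse_request request_template → Spec_parse_request request_template (parse_request request_template)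

-- ===== LEMMAS AND PROOFS =====

-- characters A appends to body while is_body is set: each non-blank line plus '\n'
def pvBodyChars (rest : List String) : List Char :=
  (rest.filter (fun l => !(PySem.Str.strip l == ""))).flatMap (fun l => l.toList ++ ['\n'])

theorem pvBodyPhase (rest : List String) (d : PySem.Dict String String) (b : List Char) :
    rest.foldl parseStepA (d, b, true) = (d, b ++ pvBodyChars rest, true) := by
  induction rest generalizing b with
  | nil => simp [pvBodyChars]
  | cons l rest ih =>
    by_cases h : PySem.Str.strip l == ""
    · simp [List.foldl_cons, parseStepA, h, ih, pvBodyChars]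
    · simp [List.foldl_cons, parseStepA, h, ih, pvBodyChars]

theorem pvMainPhase (rest : List String) (d : PySem.Dict String String) (b : List Char) :
    rest.foldl parseStepA (d, b, false) =
      (((rest.take ((rest.findIdx? (fun l => PySem.Str.strip l == "")).getD rest.length)).foldl parseHeaderStep d),
       b ++ pvBodyChars (rest.drop (((rest.findIdx? (fun l => PySem.Str.strip l == "")).getD rest.length) + 1)),
       decide (((rest.findIdx? (fun l => PySem.Str.strip l == "")).getD rest.length) < rest.length)) := by
  induction rest generalizing d b with
  | nil => simp [pvBodyChars]
  | cons l rest ih =>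
    by_cases h : PySem.Str.strip l == ""
    · simp [List.foldl_cons, parseStepA, h, List.findIdx?_cons, pvBodyPhase]
    · have hstep : parseStepA (d, b, false) l = (parseHeaderStep d l, b, false) := by
        simp only [parseStepA, parseHeaderStep, h, if_false, Bool.false_eq_true]
        cases hc : PySem.Chars.isIn [':', ' '] l.toList with
        | false => simp [PySem.Str.isIn, hc]
        | true =>
          simp only [PySem.Str.isIn, show (": " : String).toList = [':', ' '] from rfl, hc, if_true]
          rcases hm : (PySem.Str.splitMax? l ": " 1).getD [] with _ | ⟨a, _ | ⟨b2, _ | ⟨c, t⟩⟩⟩ <;> simp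
      have hsep : ((l :: rest).findIdx? (fun l => PySem.Str.strip l == "")).getD (l :: rest).length
          = ((rest.findIdx? (fun l => PySem.Str.strip l == "")).getD rest.length) + 1 := by
        rw [List.findIdx?_cons]
        simp only [h, if_false, Bool.false_eq_true]
        cases hfi : rest.findIdx? (fun l => PySem.Str.strip l == "") <;> simp [List.length_cons]
      rw [List.foldl_cons, hstep, ih, hsep]
      simp [List.take_succ_cons, List.drop_succ_cons]

theorem pvStripNL (x : List Char) :
    PySem.Chars.strip (x ++ ['\n']) = PySem.Chars.strip x := by
  have hnl : PySem.Chars.isspace '\n' = true := by decide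
  simp only [PySem.Chars.strip, PySem.Chars.lstrip, PySem.Chars.rstrip]
  rw [List.dropWhile_append]
  by_cases h : (x.dropWhile PySem.Chars.isspace).isEmpty
  · simp [hnl, List.isEmpty_iff.mp h]
  · simp only [h, if_false, Bool.false_eq_true]
    rw [List.reverse_append]
    simp [hnl]

theorem pvFlatMapJoin (ls : List (List Char)) (h : ls ≠ []) :
    ls.flatMap (fun l => l ++ ['\n']) = List.intercalate ['\n'] ls ++ ['\n'] := by
  induction ls with
  | nil => simp at h
  | cons a ls ih =>
    cases ls with
    | nil => simp [List.intercalate]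
    | cons b ls' =>
      rw [List.flatMap_cons, ih (by simp)]
      rw [show List.intercalate ['\n'] (a :: b :: ls') = a ++ ['\n'] ++ List.intercalate ['\n'] (b :: ls') from by
        simp [List.intercalate, List.intersperse]]
      simp

theorem pvBodyJoin (ls : List String) :
    String.ofList (PySem.Chars.strip (ls.flatMap (fun l => l.toList ++ ['\n'])))
      = PySem.Str.strip (PySem.Str.join "\n" ls) := by
  simp only [PySem.Str.strip, PySem.Str.join, PySem.Chars.join]
  rw [String.toList_ofList]
  cases hls : ls with
  | nil => simp [List.intercalate]
  | cons a ls' =>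
    have h1 : (a :: ls').flatMap (fun l => l.toList ++ ['\n'])
        = ((a :: ls').map String.toList).flatMap (fun l => l ++ ['\n']) := by
      rw [List.flatMap_map]
    rw [h1, pvFlatMapJoin _ (by simp), pvStripNL]
    rfl

set_option maxHeartbeats 2000000 in
theorem parse_request_eq_alt (s : String) (hpre : Pre_parse_request s) :
    parse_request s = parse_request_alt s := by
  unfold Pre_parse_request at hpre
  obtain ⟨m, u, r, hparts⟩ := List.length_eq_three.mp hpre
  simp only [parse_request, parse_request_alt, hparts]
  rw [pvMainPhase]
  simp only [pvBodyChars, List.nil_append]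
  rw [pvBodyJoin]

-- ===== VERDICT (by name: the statement is the Claim_ definition above) =====
set_option maxHeartbeats 2000000 in
theorem parse_request_spec : Claim_equal_parse_request := by
  intro s _ hpre
  unfold Spec_parse_request
  exact parse_request_eq_alt s hpre
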